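-- pv_equiv track=rewrite | github.com/WinHtut16/msa-bioinformatics | src/output_formatter.py | find_conserved_regions
-- ===== SOURCE A (Python) =====
-- def find_conserved_regions(column_types, min_length=3):
--     """
--     Identify runs of consecutive conserved columns.
--
--     A conserved region is a contiguous block of 'conserved' columns
--     of at least `min_length` columns — these are the biologically
--     most meaningful parts of the alignment (potential drug targets,
--     functional domains, etc.).
--
--     Parameters
--     ----------
--     column_types : list[str]
--         Per-column type labels from compute_alignment_stats().
--     min_length : int
--         Minimum number of consecutive conserved columns to report.
--
--     Returns
--     -------
--     list of dicts, each with keys: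
--         start  – 1-based start position
--         end    – 1-based end position (inclusive)
--         length – number of conserved columns in the run
--     """
--     regions = []
--     in_run  = False
--     run_start = 0
--
--     for i, ct in enumerate(column_types):
--         if ct == 'conserved':
--             if not in_run:
--                 in_run    = True
--                 run_start = i
--         else:
--             if in_run:
--                 run_len = i - run_start
--                 if run_len >= min_length:
--                     regions.append({
--                         "start":  run_start + 1,   # convert to 1-based
--                         "end":    i,               # inclusive 1-based
--                         "length": run_len,
--                     })
--                 in_run = False
--
--     # Handle a conserved run that extends to the last column
--     if in_run:
--         run_len = len(column_types) - run_start
--         if run_len >= min_length: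
--             regions.append({
--                 "start":  run_start + 1,
--                 "end":    len(column_types),
--                 "length": run_len,
--             })
--
--     return regions
-- ===== SOURCE B (Python) =====
-- def find_conserved_regions(column_types, min_length=3):
--     """Run-splitting rewrite: scan maximal runs of equal labels with two
--     indices, report the conserved runs that are long enough."""
--     regions = []
--     n = len(column_types)
--     i = 0
--     while i < n:
--         j = i + 1
--         while j < n and column_types[j] == column_types[i]:
--             j += 1
--         if column_types[i] == 'conserved' and j - i >= min_length:
--             regions.append({"start": i + 1, "end": j, "length": j - i})
--         i = j
--     return regions
-- ===== Notes on version B (the rewrite author's own statement) =====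
-- stated objective: alternative
-- what changed: Replaces the in_run/run_start flag state machine with trailing-run post-handler by a two-index scan over maximal runs of equal labels, emitting each long-enough conserved run directly.
import Mathlib
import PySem

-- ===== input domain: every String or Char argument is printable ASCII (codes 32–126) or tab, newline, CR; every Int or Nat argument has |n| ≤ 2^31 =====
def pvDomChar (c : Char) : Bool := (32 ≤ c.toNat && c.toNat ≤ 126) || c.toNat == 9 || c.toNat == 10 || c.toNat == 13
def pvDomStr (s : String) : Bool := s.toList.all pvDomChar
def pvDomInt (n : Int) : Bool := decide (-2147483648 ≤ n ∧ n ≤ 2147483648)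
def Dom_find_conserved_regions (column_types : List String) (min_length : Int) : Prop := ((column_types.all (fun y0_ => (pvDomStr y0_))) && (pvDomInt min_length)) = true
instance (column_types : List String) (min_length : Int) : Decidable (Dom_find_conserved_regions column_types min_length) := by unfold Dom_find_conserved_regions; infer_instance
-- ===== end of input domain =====

-- B replaces A's in_run/run_start flag state machine (with its trailing-run handler)
-- by a two-index scan over maximal runs of equal labels; same output, same O(n) cost.

-- ===== PORT A =====
-- the for-loop of A: state (regions, in_run, run_start), i is the loop index
def aLoop (min_length : Int) : List String → Int → (List (List (String × Int)) × Bool × Int) → (List (List (String × Int)) × Bool × Int)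
  | [], _, st => st
  | ct :: rest, i, (regions, in_run, run_start) =>
    if ct == "conserved" then
      if !in_run then aLoop min_length rest (i + 1) (regions, true, i)
      else aLoop min_length rest (i + 1) (regions, in_run, run_start)
    else
      if in_run then
        let run_len := i - run_start
        let regions' := if run_len ≥ min_length then
            regions ++ [[("start", run_start + 1), ("end", i), ("length", run_len)]]
          else regions
        aLoop min_length rest (i + 1) (regions', false, run_start)
      else aLoop min_length rest (i + 1) (regions, in_run, run_start)

def find_conserved_regions (column_types : List String) (min_length : Int) : List (List (String × Int)) :=
  match aLoop min_length column_types 0 ([], false, 0) with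
  | (regions, in_run, run_start) =>
    -- handle a conserved run that extends to the last column
    if in_run then
      let run_len := (column_types.length : Int) - run_start
      if run_len ≥ min_length then
        regions ++ [[("start", run_start + 1), ("end", (column_types.length : Int)), ("length", run_len)]]
      else regions
    else regions

-- ===== PORT B =====
-- outer while loop of B: each step consumes one maximal run of equal labels
-- (the inner `while j < n and column_types[j] == column_types[i]` = takeWhile/dropWhile)
def bGo (min_length : Int) : List String → Int → List (List (String × Int))
  | [], _ => []
  | x :: xs, pos =>
    let n : Int := 1 + (xs.takeWhile (· == x)).length
    (if x = "conserved" ∧ n ≥ min_length then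
        [[("start", pos + 1), ("end", pos + n), ("length", n)]]
      else []) ++ bGo min_length (xs.dropWhile (· == x)) (pos + n)
termination_by l => l.length
decreasing_by
  simp only [List.length_cons]
  exact Nat.lt_succ_of_le (List.length_dropWhile_le _ _)

def find_conserved_regions_alt (column_types : List String) (min_length : Int) : List (List (String × Int)) :=
  bGo min_length column_types 0

-- ===== PRECONDITION & SPEC =====
def Spec_find_conserved_regions (column_types : List String) (min_length : Int) (out : List (List (String × Int))) : Prop := out = find_conserved_regions_alt column_types min_length
instance (column_types : List String) (min_length : Int) (out : List (List (String × Int))) : Decidable (Spec_find_conserved_regions column_types min_length out) := by unfold Spec_find_conserved_regions; infer_instance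

-- ===== CLAIM (what is proved, stated in full; the proofs are below) =====
def Claim_equal_find_conserved_regions : Prop := ∀ (column_types : List String) (min_length : Int), Dom_find_conserved_regions column_types min_length → Spec_find_conserved_regions column_types min_length (find_conserved_regions column_types min_length)

-- ===== LEMMAS AND PROOFS =====

-- the region record both programs emit for a conserved run over positions s..e-1 (0-based)
def emit (min_length s e : Int) : List (List (String × Int)) :=
  if e - s ≥ min_length then [[("start", s + 1), ("end", e), ("length", e - s)]] else []

-- A's trailing-run handler, with N = len(column_types)
def postA (min_length N : Int) : (List (List (String × Int)) × Bool × Int) → List (List (String × Int))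
  | (regions, in_run, s) => if in_run then regions ++ emit min_length s N else regions

lemma bGo_cons (ml : Int) (x : String) (xs : List String) (pos : Int) :
    bGo ml (x :: xs) pos =
      (if x = "conserved" then emit ml pos (pos + 1 + (xs.takeWhile (· == x)).length) else []) ++
        bGo ml (xs.dropWhile (· == x)) (pos + 1 + (xs.takeWhile (· == x)).length) := by
  rw [bGo]
  have h1 : pos + (1 + ((xs.takeWhile (· == x)).length : Int)) = pos + 1 + (xs.takeWhile (· == x)).length := by ring
  rw [h1]
  congr 1
  by_cases hx : x = "conserved"
  · simp only [hx, emit, true_and, if_true]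
    have h2 : pos + 1 + ((xs.takeWhile (· == "conserved")).length : Int) - pos = 1 + (xs.takeWhile (· == "conserved")).length := by ring
    rw [h2]
  · simp [hx]

-- skipping one non-conserved element on B's side
lemma bGo_noncons (ml : Int) (x : String) (xs : List String) (i : Int) (hx : x ≠ "conserved") :
    bGo ml (x :: xs) i = bGo ml xs (i + 1) := by
  cases xs with
  | nil => simp [bGo, hx]
  | cons y ys =>
    by_cases hyx : y = x
    · subst hyx
      rw [bGo_cons _ _ _ _, bGo_cons _ _ _ _]
      simp only [hx, if_false, List.takeWhile, List.dropWhile, beq_self_eq_true, List.length_cons]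
      push_cast
      ring_nf
    · rw [bGo_cons _ _ _ _]
      have hb : (y == x) = false := beq_eq_false_iff_ne.mpr hyx
      have h1 : ((y :: ys).takeWhile (· == x)) = [] := by
        simp [List.takeWhile, hb]
      have h2 : ((y :: ys).dropWhile (· == x)) = y :: ys := by
        simp [List.dropWhile, hb]
      simp [h1, h2, hx]

-- main invariant: joint statement for the two loop states of A
lemma key (ml : Int) (l : List String) : ∀ (i : Int) (regions : List (List (String × Int))) (s : Int),
    (postA ml (i + l.length) (aLoop ml l i (regions, false, s)) = regions ++ bGo ml l i)
    ∧ (postA ml (i + l.length) (aLoop ml l i (regions, true, s)) =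
        (regions ++ emit ml s (i + (l.takeWhile (· == "conserved")).length)) ++
          bGo ml (l.dropWhile (· == "conserved")) (i + (l.takeWhile (· == "conserved")).length)) := by
  induction l with
  | nil => intro i regions s; simp [aLoop, postA, bGo]
  | cons x xs ih =>
    intro i regions s
    by_cases hx : x = "conserved"
    · subst hx
      constructor
      · rw [aLoop]
        simp only [beq_self_eq_true, Bool.not_false, if_pos]
        have := (ih (i + 1) regions i).2
        rw [show i + (("conserved" :: xs).length : Int) = i + 1 + xs.length by simp; ring]
        rw [this, bGo_cons]
        simp
      · rw [aLoop]
        simp only [beq_self_eq_true, if_true, Bool.not_true, Bool.false_eq_true, if_false]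
        have := (ih (i + 1) regions s).2
        rw [show i + (("conserved" :: xs).length : Int) = i + 1 + xs.length by simp; ring]
        rw [this]
        have ht : (("conserved" :: xs).takeWhile (· == "conserved")) = "conserved" :: xs.takeWhile (· == "conserved") := by
          simp [List.takeWhile]
        have hd : (("conserved" :: xs).dropWhile (· == "conserved")) = xs.dropWhile (· == "conserved") := by
          simp [List.dropWhile]
        rw [ht, hd]
        rw [show i + ((("conserved" :: xs.takeWhile (· == "conserved"))).length : Int)
              = i + 1 + ((xs.takeWhile (· == "conserved")).length : Int) by
          simp [Nat.cast_add]; ring]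
    · have hxb : (x == "conserved") = false := by simp [hx]
      constructor
      · rw [aLoop]
        simp only [hxb, Bool.false_eq_true, if_false]
        have := (ih (i + 1) regions s).1
        rw [show i + ((x :: xs).length : Int) = i + 1 + xs.length by simp; ring]
        rw [this, bGo_noncons ml x xs i hx]
      · rw [aLoop]
        simp only [hxb, Bool.false_eq_true, if_false, if_pos]
        have := (ih (i + 1)
          (if i - s ≥ ml then regions ++ [[("start", s + 1), ("end", i), ("length", i - s)]] else regions) s).1
        rw [show i + ((x :: xs).length : Int) = i + 1 + xs.length by simp; ring]
        rw [this]
        have ht : ((x :: xs).takeWhile (· == "conserved")) = [] := by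
          simp [List.takeWhile, hxb]
        have hd : ((x :: xs).dropWhile (· == "conserved")) = x :: xs := by
          simp [List.dropWhile, hxb]
        rw [ht, hd]
        simp only [List.length_nil, Nat.cast_zero, add_zero]
        rw [bGo_noncons ml x xs i hx]
        unfold emit
        split_ifs <;> simp

-- ===== VERDICT (by name: the statement is the Claim_ definition above) =====
theorem find_conserved_regions_spec : Claim_equal_find_conserved_regions := by
  intro cts ml _
  unfold Spec_find_conserved_regions find_conserved_regions find_conserved_regions_alt
  have h := (key ml cts 0 [] 0).1
  simp only [zero_add] at h
  have hpost : (match aLoop ml cts 0 ([], false, 0) with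
      | (regions, in_run, run_start) =>
        if in_run then
          if (cts.length : Int) - run_start ≥ ml then
            regions ++ [[("start", run_start + 1), ("end", (cts.length : Int)), ("length", (cts.length : Int) - run_start)]]
          else regions
        else regions) = postA ml (cts.length : Int) (aLoop ml cts 0 ([], false, 0)) := by
    rcases aLoop ml cts 0 ([], false, 0) with ⟨regions, in_run, run_start⟩
    simp only [postA, emit]
    split_ifs <;> simp
  rw [hpost, h]
  simp
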